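-- pv_equiv track=rewrite | github.com/jkriig/privacy-sweep | pdr_scanner.py | flatten_sites_arg
-- ===== SOURCE A (Python) =====
-- SITE_GROUPS = {
--     "peoplecore": [
--         "whitepages","spokeo","beenverified","intelius","truthfinder",
--         "fastpeoplesearch","truepeoplesearch","radaris","nuwber"
--     ],
--     "google": ["google_site_whitepages","google_site_spokeo"],
--     "startpage": ["startpage_site_whitepages","startpage_site_spokeo"],
--     "brokers_plus": [
--         "peoplecore",
--         "freebackgroundcheck","infotracer","recordsfinder","affordablebackground",
--         "govarrestssearch","idstrong","reversephonecheck","searchquarry",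
--         "texaswarrants","usrecords","uswarrants"
--     ],
--     "more_people": [
--         "peoplefinders","ussearch","peoplelooker","addresses","neighborwho",
--         "peekyou","thatsthem","cocofinder","clustrmaps"
--     ],
-- }
--
-- def flatten_sites_arg(arg: str):
--     if arg == "all": return ["all"]
--     raw = [s.strip().lower() for s in arg.split(",") if s.strip()]
--     expanded = []
--     for s in raw:
--         if s in SITE_GROUPS:
--             for item in SITE_GROUPS[s]:
--                 if item in SITE_GROUPS: expanded.extend(SITE_GROUPS[item])
--                 else: expanded.append(item)
--         else:
--             expanded.append(s)
--     return expanded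
-- ===== SOURCE B (Python) =====
-- SITE_GROUPS = {
--     "peoplecore": [
--         "whitepages","spokeo","beenverified","intelius","truthfinder",
--         "fastpeoplesearch","truepeoplesearch","radaris","nuwber"
--     ],
--     "google": ["google_site_whitepages","google_site_spokeo"],
--     "startpage": ["startpage_site_whitepages","startpage_site_spokeo"],
--     "brokers_plus": [
--         "peoplecore",
--         "freebackgroundcheck","infotracer","recordsfinder","affordablebackground",
--         "govarrestssearch","idstrong","reversephonecheck","searchquarry",
--         "texaswarrants","usrecords","uswarrants"
--     ],
--     "more_people": [
--         "peoplefinders","ussearch","peoplelooker","addresses","neighborwho",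
--         "peekyou","thatsthem","cocofinder","clustrmaps"
--     ],
-- }
--
-- # One-time resolver: each group name mapped to its fully expanded member list
-- # (members that are themselves groups are expanded one level, like A does).
-- RESOLVED = {}
-- for _g, _members in SITE_GROUPS.items():
--     _acc = []
--     for _m in _members:
--         _acc.extend(SITE_GROUPS.get(_m, [_m]))
--     RESOLVED[_g] = _acc
--
-- def flatten_sites_arg(arg: str):
--     if arg == "all":
--         return ["all"]
--     tokens = [s.strip().lower() for s in arg.split(",") if s.strip()]
--     out = []
--     for t in tokens:
--         out.extend(RESOLVED.get(t, [t]))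
--     return out
-- ===== Notes on version B (the rewrite author's own statement) =====
-- stated objective: alternative
-- what changed: B precomputes a fully-resolved group table (each group name mapped to its expanded member list, nested groups expanded once at build time) and then flattens the parsed tokens in a single flat lookup pass, instead of A's nested per-token expansion over SITE_GROUPS.
import Mathlib
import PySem

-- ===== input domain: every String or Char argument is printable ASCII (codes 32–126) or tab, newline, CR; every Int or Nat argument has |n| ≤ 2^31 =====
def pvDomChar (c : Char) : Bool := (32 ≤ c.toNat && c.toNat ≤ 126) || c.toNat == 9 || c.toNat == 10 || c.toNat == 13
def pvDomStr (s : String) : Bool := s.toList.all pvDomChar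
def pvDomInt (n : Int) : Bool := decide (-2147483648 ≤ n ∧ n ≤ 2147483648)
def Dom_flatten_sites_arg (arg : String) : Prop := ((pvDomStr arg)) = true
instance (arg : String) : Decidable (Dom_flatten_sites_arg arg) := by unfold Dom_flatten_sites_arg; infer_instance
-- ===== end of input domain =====

-- B replaces A's nested per-token group expansion by a table of fully resolved
-- groups built once, then a single flat lookup pass over the parsed tokens
-- (objective: alternative decomposition; same cost at this fixed table size).

-- ===== PORT A =====
def SITE_GROUPS : PySem.Dict String (List String) := PySem.Dict.ofList [
  ("peoplecore", ["whitepages","spokeo","beenverified","intelius","truthfinder",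
    "fastpeoplesearch","truepeoplesearch","radaris","nuwber"]),
  ("google", ["google_site_whitepages","google_site_spokeo"]),
  ("startpage", ["startpage_site_whitepages","startpage_site_spokeo"]),
  ("brokers_plus", ["peoplecore",
    "freebackgroundcheck","infotracer","recordsfinder","affordablebackground",
    "govarrestssearch","idstrong","reversephonecheck","searchquarry",
    "texaswarrants","usrecords","uswarrants"]),
  ("more_people", ["peoplefinders","ussearch","peoplelooker","addresses","neighborwho",
    "peekyou","thatsthem","cocofinder","clustrmaps"])]

-- arg.split(",") has a nonempty separator, so Str.split? is always `some`: getD [] is exact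
def flatten_sites_arg (arg : String) : List String :=
  if arg = "all" then ["all"]
  else
    let raw := ((PySem.Str.split? arg ",").getD []).filterMap
      (fun s => if PySem.Str.strip s ≠ "" then some (PySem.Str.lower (PySem.Str.strip s)) else none)
    raw.foldl (fun expanded s =>
      match SITE_GROUPS.get? s with
      | some members =>
          members.foldl (fun acc item =>
            match SITE_GROUPS.get? item with
            | some g => acc ++ g
            | none => acc ++ [item]) expanded
      | none => expanded ++ [s]) []

-- ===== PORT B =====
def RESOLVED : PySem.Dict String (List String) :=
  SITE_GROUPS.items.foldl (fun d gm =>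
    d.insert gm.1 (gm.2.foldl (fun acc m => acc ++ SITE_GROUPS.getD m [m]) []))
    PySem.Dict.empty

def flatten_sites_arg_alt (arg : String) : List String :=
  if arg = "all" then ["all"]
  else
    let tokens := ((PySem.Str.split? arg ",").getD []).filterMap
      (fun s => if PySem.Str.strip s ≠ "" then some (PySem.Str.lower (PySem.Str.strip s)) else none)
    tokens.foldl (fun out t => out ++ RESOLVED.getD t [t]) []

-- ===== PRECONDITION & SPEC =====
def Spec_flatten_sites_arg (arg : String) (out : List String) : Prop := out = flatten_sites_arg_alt arg
instance (arg : String) (out : List String) : Decidable (Spec_flatten_sites_arg arg out) := by unfold Spec_flatten_sites_arg; infer_instance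

-- ===== CLAIM (what is proved, stated in full; the proofs are below) =====
def Claim_equal_flatten_sites_arg : Prop := ∀ (arg : String), Dom_flatten_sites_arg arg → Spec_flatten_sites_arg arg (flatten_sites_arg arg)

-- ===== LEMMAS AND PROOFS =====

-- A's expansion of one member of a group
def pvGexp (item : String) : List String :=
  match SITE_GROUPS.get? item with
  | some g => g
  | none => [item]

theorem pv_step (a : List String) (item : String) :
    (match SITE_GROUPS.get? item with
     | some g => a ++ g
     | none => a ++ [item]) = a ++ pvGexp item := by
  unfold pvGexp; cases SITE_GROUPS.get? item <;> rfl

theorem pv_shift (l acc : List String) :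
    l.foldl (fun a item =>
      match SITE_GROUPS.get? item with
      | some g => a ++ g
      | none => a ++ [item]) acc = acc ++ l.flatMap pvGexp := by
  induction l generalizing acc with
  | nil => simp
  | cons x xs ih =>
      rw [List.foldl_cons, pv_step, ih, List.flatMap_cons, List.append_assoc]

-- the resolved table, written out
theorem pv_RESOLVED_eq : RESOLVED = PySem.Dict.mk [
  ("peoplecore", ["whitepages", "spokeo", "beenverified", "intelius", "truthfinder", "fastpeoplesearch", "truepeoplesearch", "radaris", "nuwber"]),
  ("google", ["google_site_whitepages", "google_site_spokeo"]),
  ("startpage", ["startpage_site_whitepages", "startpage_site_spokeo"]),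
  ("brokers_plus", ["whitepages", "spokeo", "beenverified", "intelius", "truthfinder", "fastpeoplesearch", "truepeoplesearch", "radaris", "nuwber", "freebackgroundcheck", "infotracer", "recordsfinder", "affordablebackground", "govarrestssearch", "idstrong", "reversephonecheck", "searchquarry", "texaswarrants", "usrecords", "uswarrants"]),
  ("more_people", ["peoplefinders", "ussearch", "peoplelooker", "addresses", "neighborwho", "peekyou", "thatsthem", "cocofinder", "clustrmaps"])] := by
  decide


-- SITE_GROUPS, in constructor form (for get?_mk_cons)
theorem pv_SITE_eq : SITE_GROUPS = PySem.Dict.mk [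
  ("peoplecore", ["whitepages","spokeo","beenverified","intelius","truthfinder",
    "fastpeoplesearch","truepeoplesearch","radaris","nuwber"]),
  ("google", ["google_site_whitepages","google_site_spokeo"]),
  ("startpage", ["startpage_site_whitepages","startpage_site_spokeo"]),
  ("brokers_plus", ["peoplecore",
    "freebackgroundcheck","infotracer","recordsfinder","affordablebackground",
    "govarrestssearch","idstrong","reversephonecheck","searchquarry",
    "texaswarrants","usrecords","uswarrants"]),
  ("more_people", ["peoplefinders","ussearch","peoplelooker","addresses","neighborwho",
    "peekyou","thatsthem","cocofinder","clustrmaps"])] := by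
  decide

-- Per-token agreement: A's nested expansion of one token equals B's resolved lookup.
theorem pv_token (acc : List String) (t : String) :
    (match SITE_GROUPS.get? t with
     | some members =>
         members.foldl (fun a item =>
           match SITE_GROUPS.get? item with
           | some g => a ++ g
           | none => a ++ [item]) acc
     | none => acc ++ [t])
    = acc ++ RESOLVED.getD t [t] := by
  rw [PySem.Dict.getD, pv_RESOLVED_eq]
  by_cases h1 : t = "peoplecore"
  · subst h1
    rw [show SITE_GROUPS.get? "peoplecore" = some ["whitepages","spokeo","beenverified",
      "intelius","truthfinder","fastpeoplesearch","truepeoplesearch","radaris","nuwber"] from by decide]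
    exact (pv_shift _ acc).trans (by congr 1)
  by_cases h2 : t = "google"
  · subst h2
    rw [show SITE_GROUPS.get? "google" = some ["google_site_whitepages","google_site_spokeo"] from by decide]
    exact (pv_shift _ acc).trans (by congr 1)
  by_cases h3 : t = "startpage"
  · subst h3
    rw [show SITE_GROUPS.get? "startpage" = some ["startpage_site_whitepages","startpage_site_spokeo"] from by decide]
    exact (pv_shift _ acc).trans (by congr 1)
  by_cases h4 : t = "brokers_plus"
  · subst h4
    rw [show SITE_GROUPS.get? "brokers_plus" = some ["peoplecore",
      "freebackgroundcheck","infotracer","recordsfinder","affordablebackground",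
      "govarrestssearch","idstrong","reversephonecheck","searchquarry",
      "texaswarrants","usrecords","uswarrants"] from by decide]
    exact (pv_shift _ acc).trans (by congr 1)
  by_cases h5 : t = "more_people"
  · subst h5
    rw [show SITE_GROUPS.get? "more_people" = some ["peoplefinders","ussearch","peoplelooker",
      "addresses","neighborwho","peekyou","thatsthem","cocofinder","clustrmaps"] from by decide]
    exact (pv_shift _ acc).trans (by congr 1)
  have hA : SITE_GROUPS.get? t = none := by
    rw [pv_SITE_eq]
    simp [PySem.Dict.get?,
      Ne.symm h1, Ne.symm h2, Ne.symm h3, Ne.symm h4, Ne.symm h5]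
  have hB : ((PySem.Dict.mk [
      ("peoplecore", ["whitepages", "spokeo", "beenverified", "intelius", "truthfinder", "fastpeoplesearch", "truepeoplesearch", "radaris", "nuwber"]),
      ("google", ["google_site_whitepages", "google_site_spokeo"]),
      ("startpage", ["startpage_site_whitepages", "startpage_site_spokeo"]),
      ("brokers_plus", ["whitepages", "spokeo", "beenverified", "intelius", "truthfinder", "fastpeoplesearch", "truepeoplesearch", "radaris", "nuwber", "freebackgroundcheck", "infotracer", "recordsfinder", "affordablebackground", "govarrestssearch", "idstrong", "reversephonecheck", "searchquarry", "texaswarrants", "usrecords", "uswarrants"]),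
      ("more_people", ["peoplefinders", "ussearch", "peoplelooker", "addresses", "neighborwho", "peekyou", "thatsthem", "cocofinder", "clustrmaps"])]).get? t) = none := by
    simp [PySem.Dict.get?,
      Ne.symm h1, Ne.symm h2, Ne.symm h3, Ne.symm h4, Ne.symm h5]
  rw [hA, hB]; rfl

theorem pv_fold (toks : List String) (acc : List String) :
    toks.foldl (fun expanded s =>
      match SITE_GROUPS.get? s with
      | some members =>
          members.foldl (fun a item =>
            match SITE_GROUPS.get? item with
            | some g => a ++ g
            | none => a ++ [item]) expanded
      | none => expanded ++ [s]) acc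
    = toks.foldl (fun out t => out ++ RESOLVED.getD t [t]) acc := by
  simp only [pv_token]

-- ===== VERDICT (by name: the statement is the Claim_ definition above) =====
theorem flatten_sites_arg_spec : Claim_equal_flatten_sites_arg := by
  intro arg _
  unfold Spec_flatten_sites_arg flatten_sites_arg flatten_sites_arg_alt
  by_cases h : arg = "all"
  · simp [h]
  · simp only [h, if_false]
    exact pv_fold _ _
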